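-- pv_equiv track=rewrite | github.com/anirudhakulkarni/competitive-programming | codeforces/anirudhak47/1353/E.py | consecutize
-- ===== SOURCE A (Python) =====
-- def consecutize(a):
--     if sum(a)==0:
--         return 0
--     n=len(a)
--     rt=n
--     aon=[0]
--     aoff=[0]
--     for i in a:
--         aon+=[aon[-1]+i]
--         aoff+=[aoff[-1]+1-i]
--     for l in range(n):
--         for r in range(l,n):
--             tmp=0
--             tmp+=aon[l]-aon[0]
--             tmp+=aoff[r+1]-aoff[l]
--             tmp+=aon[n]-aon[r+1]
--             rt=min(rt,tmp)
--     return rt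
-- ===== SOURCE B (Python) =====
-- def consecutize(a):
--     t = sum(a)
--     if t == 0:
--         return 0
--     n = len(a)
--     best = n
--     g = 0        # g(j) = 2*prefix_sum(j) - j
--     minpref = 0  # min g(l) over l < current j
--     for x in a:
--         g += 2 * x - 1
--         best = min(best, t + minpref - g)
--         minpref = min(minpref, g)
--     return best
-- ===== Notes on version B (the rewrite author's own statement) =====
-- stated objective: faster
-- what changed: Replaced the O(n^2) scan over all (l,r) block boundaries (with two precomputed prefix arrays) by a single O(n) pass: each candidate cost equals total + g(l) - g(j) for g(i)=2*prefix(i)-i, so one loop maintaining the running minimum of g suffices.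
import Mathlib
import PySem

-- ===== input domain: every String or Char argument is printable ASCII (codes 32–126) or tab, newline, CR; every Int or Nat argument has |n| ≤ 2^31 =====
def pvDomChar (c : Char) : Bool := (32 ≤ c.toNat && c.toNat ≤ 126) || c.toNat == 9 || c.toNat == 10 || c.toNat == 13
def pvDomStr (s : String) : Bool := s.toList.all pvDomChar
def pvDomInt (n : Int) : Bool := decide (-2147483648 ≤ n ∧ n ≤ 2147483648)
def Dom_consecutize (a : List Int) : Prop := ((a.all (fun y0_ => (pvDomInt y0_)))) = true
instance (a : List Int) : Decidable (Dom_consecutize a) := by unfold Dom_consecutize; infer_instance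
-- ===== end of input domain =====

-- B replaces A's O(n^2) scan over all block boundaries by a single O(n) pass maintaining a running minimum of g(i)=2*prefix(i)-i.

-- ===== PORT A =====
def consecutize (a : List Int) : Int :=
  if a.sum = 0 then 0
  else
    let n : Int := PySem.List.len a
    let aon : List Int := a.foldl (fun acc i => acc ++ [PySem.List.pyGetD acc (-1) 0 + i]) [0]
    let aoff : List Int := a.foldl (fun acc i => acc ++ [PySem.List.pyGetD acc (-1) 0 + 1 - i]) [0]
    (PySem.List.pyRange 0 n 1).foldl (fun rt l =>
      (PySem.List.pyRange l n 1).foldl (fun rt r =>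
        min rt ((PySem.List.pyGetD aon l 0 - PySem.List.pyGetD aon 0 0)
          + (PySem.List.pyGetD aoff (r + 1) 0 - PySem.List.pyGetD aoff l 0)
          + (PySem.List.pyGetD aon n 0 - PySem.List.pyGetD aon (r + 1) 0))) rt) n

-- ===== PORT B =====
def consecutize_alt (a : List Int) : Int :=
  let t := a.sum
  if t = 0 then 0
  else
    let n : Int := PySem.List.len a
    let s := a.foldl (fun (st : Int × Int × Int) x =>
        let g := st.1 + 2 * x - 1
        (g, min st.2.1 g, min st.2.2 (t + st.2.1 - g))) ((0 : Int), (0 : Int), n)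
    s.2.2

-- ===== PRECONDITION & SPEC =====
def Spec_consecutize (a : List Int) (out : Int) : Prop := out = consecutize_alt a
instance (a : List Int) (out : Int) : Decidable (Spec_consecutize a out) := by unfold Spec_consecutize; infer_instance

-- ===== CLAIM (what is proved, stated in full; the proofs are below) =====
def Claim_equal_consecutize : Prop := ∀ (a : List Int), Dom_consecutize a → Spec_consecutize a (consecutize a)

-- ===== LEMMAS AND PROOFS =====

-- prefix sum of the first k elements, as an Int
def pvP (a : List Int) (k : ℕ) : Int := (a.take k).sum
-- g(k) = 2*prefix(k) - k, the quantity both programs implicitly minimise differences of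
def pvG (a : List Int) (k : ℕ) : Int := 2 * pvP a k - (k : Int)
-- cost of the candidate pair (l, j): total + g(l) - g(j)
def pvC (a : List Int) (l j : ℕ) : Int := a.sum + pvG a l - pvG a j
-- running minimum of g(1..k)
def pvM (a : List Int) (k : ℕ) : Int := List.foldl min 0 ((List.range k).map (fun i => pvG a (i + 1)))
-- B's running best after k steps
def pvB (a : List Int) : ℕ → Int
  | 0 => (a.length : Int)
  | k + 1 => min (pvB a k) (a.sum + pvM a k - pvG a (k + 1))

-- the list of candidate costs as A enumerates them (l outer, j = r+1 inner)
def pvLA (a : List Int) (m : ℕ) : List Int :=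
  (List.range m).flatMap (fun l => (List.range (m - l)).map (fun k => pvC a l (l + k + 1)))
-- the list of candidate costs as B effectively enumerates them (j outer, l inner)
def pvRow (a : List Int) (j : ℕ) : List Int := (List.range j).map (fun l => pvC a l j)
def pvLB (a : List Int) (m : ℕ) : List Int := (List.range m).flatMap (fun j => pvRow a (j + 1))

lemma pvP_zero (a : List Int) : pvP a 0 = 0 := by simp [pvP]
lemma pvG_zero (a : List Int) : pvG a 0 = 0 := by simp [pvG, pvP]

lemma pvP_succ (a : List Int) {k : ℕ} (h : k < a.length) :
    pvP a (k + 1) = pvP a k + a[k] := by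
  have ht : a.take (k + 1) = a.take k ++ [a[k]] := by
    rw [List.take_add_one]; simp [List.getElem?_eq_getElem h]
  unfold pvP
  rw [ht, List.sum_append, List.sum_cons, List.sum_nil, add_zero]

lemma pvM_succ (a : List Int) (k : ℕ) :
    pvM a (k + 1) = min (pvM a k) (pvG a (k + 1)) := by
  simp [pvM, List.range_succ, List.foldl_append]

-- min pulled through a fold of mins
lemma min_foldl (x y : Int) (L : List Int) :
    List.foldl min (min x y) L = min x (List.foldl min y L) := by
  induction L generalizing y with
  | nil => simp
  | cons a L ih => simpa [min_assoc] using ih (min y a)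

-- a constant added to every element passes through a min-fold
lemma foldl_min_const_add (c : Int) (h : ℕ → Int) (L : List ℕ) (y : Int) :
    List.foldl min (c + y) (L.map (fun i => c + h i)) = c + List.foldl min y (L.map h) := by
  induction L generalizing y with
  | nil => simp
  | cons a L ih => simpa [min_add_add_left] using ih (min y (h a))

-- a min-fold over a permuted list is unchanged
lemma foldl_min_perm {L₁ L₂ : List Int} (h : L₁.Perm L₂) (x : Int) :
    List.foldl min x L₁ = List.foldl min x L₂ := by
  induction h generalizing x with
  | nil => rfl
  | cons a h ih => simp [ih]
  | swap a b l => simp [min_right_comm]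
  | trans h₁ h₂ ih₁ ih₂ => rw [ih₁, ih₂]

-- a fold over a flatMap is the nested fold
lemma foldl_flatMap {α β γ : Type} (f : γ → β → γ) (g : α → List β) (L : List α) (init : γ) :
    List.foldl f init (L.flatMap g) = List.foldl (fun acc x => List.foldl f acc (g x)) init L := by
  induction L generalizing init with
  | nil => rfl
  | cons a L ih => simp [List.foldl_append, ih]

lemma flatMap_congr {α β : Type} {L : List α} {f g : α → List β}
    (h : ∀ x ∈ L, f x = g x) : L.flatMap f = L.flatMap g := by
  induction L with
  | nil => rfl
  | cons a L ih => simp [List.flatMap_cons, h a (by simp), ih (fun x hx => h x (by simp [hx]))]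

-- flatMap of "row with one extra element" is a permutation of flatMap ++ the extras
lemma flatMap_snoc_perm {α β : Type} (L : List α) (f : α → List β) (x : α → β) :
    (L.flatMap (fun l => f l ++ [x l])).Perm (L.flatMap f ++ L.map x) := by
  induction L with
  | nil => simp
  | cons a L ih =>
    simp only [List.flatMap_cons, List.map_cons]
    have h1 : (f a ++ [x a] ++ L.flatMap (fun l => f l ++ [x l])).Perm
        (f a ++ [x a] ++ (L.flatMap f ++ L.map x)) := by
      simpa [List.append_assoc] using ih.append_left (f a ++ [x a])
    refine h1.trans ?_
    simp only [List.append_assoc, List.cons_append, List.nil_append]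
    exact List.Perm.append_left _ List.perm_middle.symm

-- the two enumerations of {(l,j) : l < j ≤ m} are permutations of each other
lemma pvLA_perm_pvLB (a : List Int) (m : ℕ) : (pvLA a m).Perm (pvLB a m) := by
  induction m with
  | zero => simp [pvLA, pvLB]
  | succ m ih =>
    have hLA : pvLA a (m + 1) =
        ((List.range m).flatMap (fun l => (List.range (m - l)).map (fun k => pvC a l (l + k + 1)) ++ [pvC a l (m + 1)])) ++ [pvC a m (m + 1)] := by
      unfold pvLA
      rw [List.range_succ, List.flatMap_append]
      congr 1
      · exact flatMap_congr (fun l hl => by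
          have hlm : l < m := List.mem_range.mp hl
          have : m + 1 - l = (m - l) + 1 := by omega
          rw [this, List.range_succ, List.map_append]
          have : l + (m - l) + 1 = m + 1 := by omega
          simp [this])
      · simp
    have hrow : pvRow a (m + 1) = (List.range m).map (fun l => pvC a l (m + 1)) ++ [pvC a m (m + 1)] := by
      simp [pvRow, List.range_succ]
    have hLB : pvLB a (m + 1) = pvLB a m ++ pvRow a (m + 1) := by
      simp [pvLB, List.range_succ]
    rw [hLA, hLB, hrow]
    refine ((flatMap_snoc_perm (List.range m) _ _).append_right _).trans ?_
    rw [List.append_assoc]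
    exact ih.append_right _

-- folding min over one of B's rows
lemma row_min (a : List Int) (k : ℕ) (x : Int) :
    List.foldl min x (pvRow a (k + 1)) = min x (a.sum + pvM a k - pvG a (k + 1)) := by
  have hc : ∀ l, pvC a l (k + 1) = (a.sum - pvG a (k + 1)) + pvG a l := by
    intro l; simp [pvC]; ring
  have : pvRow a (k + 1) =
      ((a.sum - pvG a (k + 1)) + pvG a 0) :: (List.range k).map (fun i => (a.sum - pvG a (k + 1)) + pvG a (i + 1)) := by
    simp only [pvRow, List.range_succ_eq_map, List.map_cons, List.map_map]
    refine congrArg₂ _ (hc 0) ?_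
    exact List.map_congr_left (fun i _ => hc (i + 1))
  rw [this, List.foldl_cons, pvG_zero]
  have := foldl_min_const_add (a.sum - pvG a (k + 1)) (fun i => pvG a (i + 1)) (List.range k) 0
  rw [min_foldl, this]
  have : a.sum - pvG a (k + 1) + pvM a k = a.sum + pvM a k - pvG a (k + 1) := by ring
  rw [← pvM, this]

-- B's running best equals the min-fold over B's enumeration
lemma pvB_eq_foldl (a : List Int) (k : ℕ) :
    pvB a k = List.foldl min (a.length : Int) (pvLB a k) := by
  induction k with
  | zero => simp [pvB, pvLB]
  | succ k ih =>
    have hLB : pvLB a (k + 1) = pvLB a k ++ pvRow a (k + 1) := by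
      simp [pvLB, List.range_succ]
    rw [pvB, hLB, List.foldl_append, ← ih, row_min]

-- B's fold invariant
lemma B_inv (a : List Int) (k : ℕ) (hk : k ≤ a.length) :
    (a.take k).foldl (fun (st : Int × Int × Int) x =>
        let g := st.1 + 2 * x - 1
        (g, min st.2.1 g, min st.2.2 (a.sum + st.2.1 - g))) ((0 : Int), (0 : Int), (a.length : Int))
      = (pvG a k, pvM a k, pvB a k) := by
  induction k with
  | zero => simp [pvG_zero, pvM, pvB]
  | succ k ih =>
    have hklt : k < a.length := by omega
    have hg : pvG a k + 2 * a[k] - 1 = pvG a (k + 1) := by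
      simp only [pvG, pvP_succ a hklt]
      push_cast; ring
    rw [List.take_add_one, List.getElem?_eq_getElem hklt, Option.toList_some, List.foldl_append,
      ih (by omega)]
    simp only [List.foldl_cons, List.foldl_nil, hg]
    rw [pvM_succ, pvB]

-- the closed form of A's prefix-sum list aon
lemma aon_eq (a : List Int) :
    a.foldl (fun acc i => acc ++ [PySem.List.pyGetD acc (-1) 0 + i]) [0]
      = (List.range (a.length + 1)).map (fun k => pvP a k) := by
  induction a using List.reverseRecOn with
  | nil => simp [pvP]
  | append_singleton a x ih =>
    rw [List.foldl_append, List.foldl_cons, List.foldl_nil, ih]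
    have hsnoc : (List.range (a.length + 1)).map (fun k => pvP a k)
        = (List.range a.length).map (fun k => pvP a k) ++ [pvP a a.length] := by
      rw [List.range_succ]; simp
    rw [hsnoc, List.append_assoc, PySem.List.pyGetD_neg_one_append_singleton]
    have hlen : (a ++ [x]).length + 1 = (a.length + 1) + 1 := by simp
    rw [hlen, List.range_succ, List.map_append, List.range_succ, List.map_append]
    have h1 : ∀ k ∈ List.range a.length, pvP (a ++ [x]) k = pvP a k := by
      intro k hk
      have : k < a.length := List.mem_range.mp hk
      simp [pvP, List.take_append_of_le_length (le_of_lt this)]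
    have h2 : pvP (a ++ [x]) a.length = pvP a a.length := by
      simp [pvP]
    have h3 : pvP (a ++ [x]) (a.length + 1) = pvP a a.length + x := by
      have : (a ++ [x]).take (a.length + 1) = a ++ [x] := by
        apply List.take_of_length_le; simp
      simp [pvP, this]
    simp [List.map_congr_left h1, h2, h3]

-- the closed form of A's prefix-count list aoff
lemma aoff_eq (a : List Int) :
    a.foldl (fun acc i => acc ++ [PySem.List.pyGetD acc (-1) 0 + 1 - i]) [0]
      = (List.range (a.length + 1)).map (fun (k : ℕ) => (k : Int) - pvP a k) := by
  induction a using List.reverseRecOn with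
  | nil => simp [pvP]
  | append_singleton a x ih =>
    rw [List.foldl_append, List.foldl_cons, List.foldl_nil, ih]
    have hsnoc : (List.range (a.length + 1)).map (fun (k : ℕ) => (k : Int) - pvP a k)
        = (List.range a.length).map (fun (k : ℕ) => (k : Int) - pvP a k) ++ [(a.length : Int) - pvP a a.length] := by
      rw [List.range_succ]; simp
    rw [hsnoc, List.append_assoc, PySem.List.pyGetD_neg_one_append_singleton]
    have hlen : (a ++ [x]).length + 1 = (a.length + 1) + 1 := by simp
    rw [hlen, List.range_succ, List.map_append, List.range_succ, List.map_append]
    have h1 : ∀ (k : ℕ), k ∈ List.range a.length → (((k : Int) - pvP (a ++ [x]) k : Int)) = (k : Int) - pvP a k := by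
      intro k hk
      have : k < a.length := List.mem_range.mp hk
      simp [pvP, List.take_append_of_le_length (le_of_lt this)]
    have h2 : (a.length : Int) - pvP (a ++ [x]) a.length = (a.length : Int) - pvP a a.length := by
      simp [pvP]
    have h3 : ((a.length + 1 : ℕ) : Int) - pvP (a ++ [x]) (a.length + 1)
        = (a.length : Int) - pvP a a.length + 1 - x := by
      have hx : (a ++ [x]).take (a.length + 1) = a ++ [x] := by
        apply List.take_of_length_le; simp
      simp [pvP, hx]
      ring
    simp [List.map_congr_left h1, h2]
    push_cast at h3
    omega

-- getD on a mapped range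
lemma getD_map_range_lt (f : ℕ → Int) {m k : ℕ} (h : k < m) :
    ((List.range m).map f).getD k 0 = f k := by
  simp [List.getD, h]

-- A equals the min-fold over A's enumeration (on the nonzero branch)
lemma A_eq (a : List Int) (h : ¬ a.sum = 0) :
    consecutize a = List.foldl min (a.length : Int) (pvLA a a.length) := by
  have hsum : pvP a a.length = a.sum := by simp [pvP]
  unfold consecutize
  rw [if_neg h]
  simp only [PySem.List.len_eq, aon_eq, aoff_eq]
  rw [PySem.List.pyRange_one]
  have h0 : ((a.length : Int) - 0).toNat = a.length := by omega
  rw [h0, List.foldl_map]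
  simp only [pvLA]
  rw [foldl_flatMap]
  apply PySem.List.foldl_congr_mem
  intro rt lN hlN
  have hl : lN < a.length := List.mem_range.mp hlN
  rw [zero_add, PySem.List.pyRange_one]
  have h1 : ((a.length : Int) - (lN : Int)).toNat = a.length - lN := by omega
  rw [h1, List.foldl_map, List.foldl_map]
  apply PySem.List.foldl_congr_mem
  intro acc k hk
  have hkn : k < a.length - lN := List.mem_range.mp hk
  have hcast : (lN : Int) + (k : Int) + 1 = ((lN + k + 1 : ℕ) : Int) := by push_cast; ring
  rw [hcast]
  have e1 : ((List.range (a.length + 1)).map (fun k => pvP a k)).getD lN 0 = pvP a lN :=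
    getD_map_range_lt _ (by omega)
  have e2 : ((List.range (a.length + 1)).map (fun k => pvP a k)).getD 0 0 = pvP a 0 :=
    getD_map_range_lt _ (by omega)
  have e3 : ((List.range (a.length + 1)).map (fun (k : ℕ) => (k : Int) - pvP a k)).getD (lN + k + 1) 0
      = ((lN + k + 1 : ℕ) : Int) - pvP a (lN + k + 1) := getD_map_range_lt _ (by omega)
  have e4 : ((List.range (a.length + 1)).map (fun (k : ℕ) => (k : Int) - pvP a k)).getD lN 0
      = (lN : Int) - pvP a lN := getD_map_range_lt _ (by omega)
  have e5 : ((List.range (a.length + 1)).map (fun k => pvP a k)).getD a.length 0 = pvP a a.length :=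
    getD_map_range_lt _ (by omega)
  have e6 : ((List.range (a.length + 1)).map (fun k => pvP a k)).getD (lN + k + 1) 0
      = pvP a (lN + k + 1) := getD_map_range_lt _ (by omega)
  simp only [PySem.List.pyGetD_natCast, PySem.List.pyGetD_zero, e1, e2, e3, e4, e5, e6]
  congr 1
  simp only [pvC, pvG, pvP_zero, ← hsum]
  push_cast
  ring

theorem pv_main (a : List Int) : consecutize a = consecutize_alt a := by
  by_cases h : a.sum = 0
  · simp [consecutize, consecutize_alt, h]
  · have hB : consecutize_alt a = pvB a a.length := by
      have := B_inv a a.length (le_refl _)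
      simp only [List.take_length] at this
      simp [consecutize_alt, h, this]
    rw [A_eq a h, hB, pvB_eq_foldl,
      foldl_min_perm (pvLA_perm_pvLB a a.length)]

-- ===== VERDICT (by name: the statement is the Claim_ definition above) =====
theorem consecutize_spec : Claim_equal_consecutize := by
  intro a _
  unfold Spec_consecutize
  exact pv_main a
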